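-- pv_equiv track=rewrite | github.com/CharlesCrepin/WEX | firmware.py | version_part
-- ===== SOURCE A (Python) =====
-- ALLOWED_REVISION_CHARS = ['?', '.', '0', '1', '2', '3', '4', '5', '6', '7', '8', '9']
--
-- def version_part(pattern):
-- 	version = ''
-- 	for char in pattern:
-- 		if is_char_allowed(char, ALLOWED_REVISION_CHARS):
-- 			version += char
-- 		else:
-- 			return version
-- 	return version
--
-- def is_char_allowed(char, allowed_chars):
-- 	for allowed in allowed_chars:
-- 		if char == allowed:
-- 			return True
-- 	return False
-- ===== SOURCE B (Python) =====
-- import re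
--
-- _VERSION_RE = re.compile(r'[?.0-9]*')
--
-- def version_part(pattern):
--     return _VERSION_RE.match(pattern).group(0)
-- ===== Notes on version B (the rewrite author's own statement) =====
-- stated objective: idiomatic
-- what changed: Replaced the explicit accumulate-and-early-return loop with linear membership helper by a single anchored regex match over the class [?.0-9]*.
import Mathlib
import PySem

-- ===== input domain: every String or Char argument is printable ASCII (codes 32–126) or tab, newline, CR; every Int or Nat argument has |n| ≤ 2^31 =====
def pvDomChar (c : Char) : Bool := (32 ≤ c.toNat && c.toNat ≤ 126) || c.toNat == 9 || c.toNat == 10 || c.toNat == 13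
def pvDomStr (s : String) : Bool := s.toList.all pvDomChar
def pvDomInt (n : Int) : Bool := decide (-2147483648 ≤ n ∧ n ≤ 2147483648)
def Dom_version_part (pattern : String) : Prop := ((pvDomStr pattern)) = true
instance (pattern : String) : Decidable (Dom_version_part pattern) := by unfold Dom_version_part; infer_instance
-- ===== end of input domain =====

-- B replaces A's explicit accumulate-and-early-return loop (with a linear membership helper)
-- by one anchored regex match over the class [?.0-9]* (idiomatic; ported as a takeWhile over that class).


-- ===== PORT A =====
def ALLOWED_REVISION_CHARS : List Char := ['?', '.', '0', '1', '2', '3', '4', '5', '6', '7', '8', '9']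

-- Python: for allowed in allowed_chars: if char == allowed: return True; return False
def is_char_allowed (char : Char) (allowed_chars : List Char) : Bool :=
  match allowed_chars with
  | [] => false
  | allowed :: rest => if char == allowed then true else is_char_allowed char rest

-- Python: for char in pattern: if …: version += char else: return version; return version
def versionLoopA (cs : List Char) (version : List Char) : List Char :=
  match cs with
  | [] => version
  | c :: rest =>
    if is_char_allowed c ALLOWED_REVISION_CHARS then versionLoopA rest (version ++ [c])
    else version

def version_part (pattern : String) : String :=
  String.ofList (versionLoopA pattern.toList [])

-- ===== PORT B =====
-- re.match(r'[?.0-9]*', pattern).group(0): the anchored maximal leading run of the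
-- character class [?.0-9], i.e. takeWhile of that class over the string. Exact for this
-- greedy, backtracking-free pattern.
def classB (c : Char) : Bool := c == '?' || c == '.' || ('0' ≤ c && c ≤ '9')

def version_part_alt (pattern : String) : String :=
  String.ofList (pattern.toList.takeWhile classB)

-- ===== PRECONDITION & SPEC =====
def Spec_version_part (pattern : String) (out : String) : Prop := out = version_part_alt pattern
instance (pattern : String) (out : String) : Decidable (Spec_version_part pattern out) := by unfold Spec_version_part; infer_instance

-- ===== CLAIM (what is proved, stated in full; the proofs are below) =====
def Claim_equal_version_part : Prop := ∀ (pattern : String), Dom_version_part pattern → Spec_version_part pattern (version_part pattern)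

-- ===== LEMMAS AND PROOFS =====
theorem char_eq_iff (c d : Char) : (c = d) ↔ c.toNat = d.toNat := by
  constructor
  · rintro rfl; rfl
  · intro h; exact Char.ext (UInt32.toNat_inj.mp h)

theorem char_le_iff (c d : Char) : (c ≤ d) ↔ c.toNat ≤ d.toNat := by
  rw [Char.le_def, UInt32.le_iff_toNat_le]; rfl

set_option maxHeartbeats 1000000 in
theorem allowed_eq_class (c : Char) :
    is_char_allowed c ALLOWED_REVISION_CHARS = classB c := by
  simp only [ALLOWED_REVISION_CHARS, is_char_allowed, classB]
  rw [Bool.eq_iff_iff]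
  simp only [Bool.ite_eq_true_distrib, Bool.or_eq_true, Bool.and_eq_true,
    beq_iff_eq, char_eq_iff, decide_eq_true_eq, char_le_iff]
  have h1 : ('?' : Char).toNat = 63 := rfl
  have h2 : ('.' : Char).toNat = 46 := rfl
  have h3 : ('0' : Char).toNat = 48 := rfl
  have h4 : ('1' : Char).toNat = 49 := rfl
  have h5 : ('2' : Char).toNat = 50 := rfl
  have h6 : ('3' : Char).toNat = 51 := rfl
  have h7 : ('4' : Char).toNat = 52 := rfl
  have h8 : ('5' : Char).toNat = 53 := rfl
  have h9 : ('6' : Char).toNat = 54 := rfl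
  have h10 : ('7' : Char).toNat = 55 := rfl
  have h11 : ('8' : Char).toNat = 56 := rfl
  have h12 : ('9' : Char).toNat = 57 := rfl
  rw [h1, h2, h3, h4, h5, h6, h7, h8, h9, h10, h11, h12]
  split_ifs <;> simp_all <;> omega

theorem versionLoopA_eq (cs acc : List Char) :
    versionLoopA cs acc = acc ++ cs.takeWhile classB := by
  induction cs generalizing acc with
  | nil => simp [versionLoopA]
  | cons c rest ih =>
    simp only [versionLoopA, allowed_eq_class, List.takeWhile]
    cases h : classB c <;> simp [ih]

-- ===== VERDICT (by name: the statement is the Claim_ definition above) =====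
theorem version_part_spec : Claim_equal_version_part := by
  intro pattern _
  unfold Spec_version_part version_part version_part_alt
  rw [versionLoopA_eq]
  simp
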